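-- pv_equiv track=rewrite | github.com/BillFoland/daisyluAMR | system/daisylu_endec.py | getTxFuncs
-- ===== SOURCE A (Python) =====
-- def getTxFuncs(nameWordIndices, tag):
--     txFuncs=[]
--     for i,ix in enumerate(nameWordIndices):
--         if len(nameWordIndices)==1:
--             txFuncs.append( (ix, 'S_'+tag)  )
--         elif i==0:
--             txFuncs.append( (ix, 'B_'+tag)  )
--         elif i==(len(nameWordIndices)-1):
--             txFuncs.append( (ix, 'E_'+tag)  )
--         else:
--             txFuncs.append( (ix, 'I_'+tag)  )
--     return txFuncs
-- ===== SOURCE B (Python) =====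
-- def getTxFuncs(nameWordIndices, tag):
--     # one-lookahead scan: an element's role needs only "did anything come before"
--     # (out is non-empty) and "does anything come after" (the loop still runs);
--     # no lengths or indices are ever computed.
--     out = []
--     cur = None
--     have = False
--     for x in nameWordIndices:
--         if have:
--             out.append((cur, ('I_' if out else 'B_') + tag))
--         cur = x
--         have = True
--     if have:
--         out.append((cur, ('E_' if out else 'S_') + tag))
--     return out
-- ===== Notes on version B (the rewrite author's own statement) =====
-- stated objective: alternative
-- what changed: Replaces A's enumerate loop with per-element position tests against len(nameWordIndices) (len==1, i==0, i==len-1) by a one-lookahead buffered scan that never computes a length or an index: each element is emitted when its successor arrives (B_ if nothing was emitted yet, else I_), and the buffered last element is emitted after the loop as S_ or E_ depending on whether the output is still empty.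
import Mathlib
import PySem

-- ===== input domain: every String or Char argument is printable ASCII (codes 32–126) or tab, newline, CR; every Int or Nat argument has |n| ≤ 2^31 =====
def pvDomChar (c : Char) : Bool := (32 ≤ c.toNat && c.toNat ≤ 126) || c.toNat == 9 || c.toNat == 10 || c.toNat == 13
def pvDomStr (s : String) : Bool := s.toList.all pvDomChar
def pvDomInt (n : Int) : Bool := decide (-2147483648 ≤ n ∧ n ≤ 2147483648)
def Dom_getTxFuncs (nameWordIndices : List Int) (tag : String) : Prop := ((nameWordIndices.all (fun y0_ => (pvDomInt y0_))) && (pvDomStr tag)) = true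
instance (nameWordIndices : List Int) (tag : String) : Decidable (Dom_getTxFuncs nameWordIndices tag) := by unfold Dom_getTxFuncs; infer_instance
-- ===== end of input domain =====

-- B replaces A's enumerate loop with length/index tests by a one-lookahead buffered
-- scan (emit each element when its successor arrives, finalize the buffered last
-- element after the loop); same O(n) cost, no lengths or indices computed.

-- ===== PORT A =====
def getTxFuncs (nameWordIndices : List Int) (tag : String) : List (Int × String) :=
  (PySem.List.enumerate nameWordIndices).foldl
    (fun txFuncs p =>
      let i := p.1
      let ix := p.2
      if nameWordIndices.length == 1 then txFuncs ++ [(ix, "S_" ++ tag)]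
      else if i == 0 then txFuncs ++ [(ix, "B_" ++ tag)]
      else if i == (nameWordIndices.length : Int) - 1 then txFuncs ++ [(ix, "E_" ++ tag)]
      else txFuncs ++ [(ix, "I_" ++ tag)]) []

-- ===== PORT B =====
-- state = (out so far, buffered previous element); 'have' of the Python is cur = some _
def getTxFuncs_alt (nameWordIndices : List Int) (tag : String) : List (Int × String) :=
  let s := nameWordIndices.foldl
    (fun (s : List (Int × String) × Option Int) x =>
      match s.2 with
      | some cur => (s.1 ++ [(cur, (if s.1.isEmpty then "B_" else "I_") ++ tag)], some x)
      | none => (s.1, some x)) ([], none)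
  match s.2 with
  | some cur => s.1 ++ [(cur, (if s.1.isEmpty then "S_" else "E_") ++ tag)]
  | none => s.1

-- ===== PRECONDITION & SPEC =====
def Spec_getTxFuncs (nameWordIndices : List Int) (tag : String) (out : List (Int × String)) : Prop := out = getTxFuncs_alt nameWordIndices tag
instance (nameWordIndices : List Int) (tag : String) (out : List (Int × String)) : Decidable (Spec_getTxFuncs nameWordIndices tag out) := by unfold Spec_getTxFuncs; infer_instance

-- ===== CLAIM (what is proved, stated in full; the proofs are below) =====
def Claim_equal_getTxFuncs : Prop := ∀ (nameWordIndices : List Int) (tag : String), Dom_getTxFuncs nameWordIndices tag → Spec_getTxFuncs nameWordIndices tag (getTxFuncs nameWordIndices tag)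

-- ===== LEMMAS AND PROOFS =====

-- proof-only reference form: last element E, earlier ones I
def pvTail : List Int → String → List (Int × String)
  | [], _ => []
  | [x], tag => [(x, "E_" ++ tag)]
  | x :: y :: rest, tag => (x, "I_" ++ tag) :: pvTail (y :: rest) tag

def pvBody (tag : String) : List (Int × String) × Option Int → Int → List (Int × String) × Option Int :=
  fun s x =>
    match s.2 with
    | some cur => (s.1 ++ [(cur, (if s.1.isEmpty then "B_" else "I_") ++ tag)], some x)
    | none => (s.1, some x)

def pvFin (tag : String) (s : List (Int × String) × Option Int) : List (Int × String) :=
  match s.2 with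
  | some cur => s.1 ++ [(cur, (if s.1.isEmpty then "S_" else "E_") ++ tag)]
  | none => s.1

theorem pvTail_length (xs : List Int) (tag : String) :
    (pvTail xs tag).length = xs.length := by
  induction xs with
  | nil => rfl
  | cons x rest ih =>
    cases rest with
    | nil => rfl
    | cons y r => simpa [pvTail] using ih

theorem pvTail_get (xs : List Int) (tag : String) (k : Nat) (hk : k < xs.length) :
    (pvTail xs tag)[k]'(by rw [pvTail_length]; exact hk) =
      (xs[k], if k = xs.length - 1 then "E_" ++ tag else "I_" ++ tag) := by
  induction xs generalizing k with
  | nil => simp at hk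
  | cons x rest ih =>
    cases rest with
    | nil =>
      have hk0 : k = 0 := Nat.lt_one_iff.mp (by simpa using hk)
      subst hk0
      simp [pvTail]
    | cons y r =>
      cases k with
      | zero => simp [pvTail]
      | succ j =>
        have hj : j < (y :: r).length := by simpa using hk
        have := ih j hj
        simp only [pvTail, List.getElem_cons_succ]
        rw [this]
        simp only [List.length_cons]
        congr 1
        by_cases h : j = (y :: r).length - 1 <;> simp [h]

-- A's fold = map of the per-position branch over the enumeration
theorem pv_A_eq_map (xs : List Int) (tag : String) :
    getTxFuncs xs tag =
      (PySem.List.enumerate xs).map (fun p =>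
        (p.2, if xs.length == 1 then "S_" ++ tag
              else if p.1 == 0 then "B_" ++ tag
              else if p.1 == (xs.length : Int) - 1 then "E_" ++ tag
              else "I_" ++ tag)) := by
  unfold getTxFuncs
  have hfun : (fun (txFuncs : List (Int × String)) (p : Int × Int) =>
      let i := p.1
      let ix := p.2
      if xs.length == 1 then txFuncs ++ [(ix, "S_" ++ tag)]
      else if i == 0 then txFuncs ++ [(ix, "B_" ++ tag)]
      else if i == (xs.length : Int) - 1 then txFuncs ++ [(ix, "E_" ++ tag)]
      else txFuncs ++ [(ix, "I_" ++ tag)]) =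
      (fun txFuncs p => txFuncs ++
        [(p.2, if xs.length == 1 then "S_" ++ tag
               else if p.1 == 0 then "B_" ++ tag
               else if p.1 == (xs.length : Int) - 1 then "E_" ++ tag
               else "I_" ++ tag)]) := by
    funext txFuncs p
    dsimp only
    split_ifs <;> rfl
  rw [hfun, PySem.List.foldl_append_singleton_eq_map]
  simp

-- A equals the head-B / pvTail reference form
theorem pv_A_eq_ref (xs : List Int) (tag : String) :
    getTxFuncs xs tag =
      (match xs with
       | [] => []
       | [x] => [(x, "S_" ++ tag)]
       | x :: rest => (x, "B_" ++ tag) :: pvTail rest tag) := by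
  rw [pv_A_eq_map]
  match xs with
  | [] => rfl
  | [a] => simp [PySem.List.enumerate]
  | a :: b :: rest =>
    have hlen : (a :: b :: rest).length ≠ 1 := by simp
    apply List.ext_getElem
    · simp [PySem.List.length_enumerate, pvTail_length]
    · intro k hk hk'
      have hkn : k < (a :: b :: rest).length := by
        simpa [PySem.List.length_enumerate] using hk
      rw [List.getElem_map, PySem.List.getElem_enumerate]
      simp only [zero_add, beq_iff_eq, hlen, if_false]
      cases k with
      | zero => simp
      | succ j =>
        have hj : j < (b :: rest).length := by simpa using hkn
        simp only [List.getElem_cons_succ]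
        rw [pvTail_get (b :: rest) tag j hj]
        simp only [List.length_cons, Nat.add_sub_cancel]
        have h1 : ¬ (((j : Nat) : Int) + 1 = 0) := by omega
        by_cases h : j = rest.length
        · have h2 : (((j : Nat) : Int) + 1) = ((rest.length : Int) + 1 + 1) - 1 := by omega
          push_cast
          simp [h1, h2, h]
          omega
        · have h2 : ¬ ((((j : Nat) : Int) + 1) = ((rest.length : Int) + 1 + 1) - 1) := by omega
          push_cast
          simp [h1, h2, h]

-- loop invariant: with a nonempty accumulator and a buffered element, the rest of
-- the scan plus finalization produces acc ++ pvTail (cur :: xs)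
theorem pv_loop (xs : List Int) (tag : String) (cur : Int) (acc : List (Int × String))
    (hacc : acc ≠ []) :
    pvFin tag (xs.foldl (pvBody tag) (acc, some cur)) = acc ++ pvTail (cur :: xs) tag := by
  induction xs generalizing cur acc with
  | nil =>
    simp [pvFin, pvTail, List.isEmpty_iff, hacc]
  | cons x rest ih =>
    have hne : (acc ++ [(cur, "I_" ++ tag)]) ≠ [] := by simp
    have hstep : pvBody tag (acc, some cur) x =
        (acc ++ [(cur, "I_" ++ tag)], some x) := by
      simp [pvBody, List.isEmpty_iff, hacc]
    rw [List.foldl_cons, hstep, ih x _ hne]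
    simp [pvTail]

-- B's fold equals the reference form
theorem pv_B_eq_ref (xs : List Int) (tag : String) :
    getTxFuncs_alt xs tag =
      (match xs with
       | [] => []
       | [x] => [(x, "S_" ++ tag)]
       | x :: rest => (x, "B_" ++ tag) :: pvTail rest tag) := by
  match xs with
  | [] => rfl
  | [a] => simp [getTxFuncs_alt, pvFin]
  | a :: b :: rest =>
    show pvFin tag ((a :: b :: rest).foldl (pvBody tag) ([], none)) = _
    have h1 : pvBody tag ([], none) a = ([], some a) := by simp [pvBody]
    have h2 : pvBody tag ([], some a) b = ([(a, "B_" ++ tag)], some b) := by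
      simp [pvBody]
    rw [List.foldl_cons, h1, List.foldl_cons, h2,
      pv_loop rest tag b [(a, "B_" ++ tag)] (by simp)]
    simp

theorem pv_main (xs : List Int) (tag : String) :
    getTxFuncs xs tag = getTxFuncs_alt xs tag := by
  rw [pv_A_eq_ref, pv_B_eq_ref]

-- ===== VERDICT (by name: the statement is the Claim_ definition above) =====
theorem getTxFuncs_spec : Claim_equal_getTxFuncs := by
  intro xs tag _
  unfold Spec_getTxFuncs
  exact pv_main xs tag
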